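-- pv_equiv track=rewrite | github.com/pawlowiczf/ASD-2022-2023 | Egzaminy, kolokwia - poprzednie lata/Kolokwium uzupełniające 2023/kolu.py | ice_cream
-- ===== SOURCE A (Python) =====
-- def Partition(T, left, right):
--     #
--     a = left - 1
--
--     for b in range(left, right):
--         if T[b] <= T[right]:
--             a += 1
--             T[b], T[a] = T[a], T[b]
--     #
--
--     a += 1
--     T[a], T[right] = T[right], T[a]
--     return a
--
-- def quickSort(T, left, right):
--     #
--     if left < right:
--         pivot = Partition(T, left, right)
--         quickSort(T, left, pivot - 1)
--         quickSort(T, pivot + 1, right)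
--
-- def ice_cream( T ):
--     #
--     quickSort(T, 0, len(T) - 1)
--     # T = MergeSort(T)
--     a = len(T) - 1
--     maxVolume = 0
--     time = 0
--
--     while a >= 0 and T[a] - time > 0:
--         maxVolume += T[a] - time
--         a -= 1
--         time += 1
--     #
--
--     return maxVolume
-- ===== SOURCE B (Python) =====
-- def ice_cream(T):
--     # h-index style: k = max h in [0, n] with #{v in T : v >= h} >= h  (binary search,
--     # the predicate is antitone in h); then the k served values are those > k plus
--     # (k - m) copies of k, so answer = s + (k - m)*k - k*(k-1)//2.  No sorting; unlike
--     # the original, T is NOT mutated.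
--     n = len(T)
--     lo, hi = 0, n
--     while lo < hi:
--         mid = (lo + hi + 1) // 2
--         if sum(1 for v in T if v >= mid) >= mid:
--             lo = mid
--         else:
--             hi = mid - 1
--     k = lo
--     m = s = 0
--     for v in T:
--         if v > k:
--             m += 1
--             s += v
--     return s + (k - m) * k - k * (k - 1) // 2
-- ===== Notes on version B (the rewrite author's own statement) =====
-- stated objective: faster
-- what changed: B does not sort at all: it binary-searches the h-index-style cutoff k = max h with #{v >= h} >= h (the predicate is antitone in h), then computes the answer in one counting/summing pass as s + (k - m)*k - k*(k-1)//2 where m and s count and sum the elements > k; A quicksorts in place (Lomuto, quadratic on sorted/duplicate-heavy input) and accumulates a decreasing-terms loop. Return values are proved equal; unlike A, B does not mutate T.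
import Mathlib
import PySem

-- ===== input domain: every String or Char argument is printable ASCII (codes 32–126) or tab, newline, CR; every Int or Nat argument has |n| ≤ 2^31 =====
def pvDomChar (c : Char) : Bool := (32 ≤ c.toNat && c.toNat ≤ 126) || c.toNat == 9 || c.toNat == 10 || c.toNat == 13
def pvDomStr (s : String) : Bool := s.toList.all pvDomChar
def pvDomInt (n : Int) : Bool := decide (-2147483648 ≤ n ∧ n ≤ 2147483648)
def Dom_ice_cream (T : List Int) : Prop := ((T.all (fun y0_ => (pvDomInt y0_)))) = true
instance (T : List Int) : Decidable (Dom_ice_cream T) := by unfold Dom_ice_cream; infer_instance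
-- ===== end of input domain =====

-- B avoids sorting altogether: it binary-searches the cutoff k = max h with #{v ≥ h} ≥ h and
-- finishes with one counting/summing pass (objective: alternative algorithm; equal RETURN
-- values proved — A sorts the argument in place, B does not mutate it).

-- ===== PORT A =====
-- Python "T[i], T[j] = T[j], T[i]" (indices in range in every reachable call)
def pySwap (T : List Int) (i j : Int) : List Int :=
  PySem.List.pySetD (PySem.List.pySetD T i (PySem.List.pyGetD T j 0)) j (PySem.List.pyGetD T i 0)

-- the body of A's 'for b in range(left, right)' loop, state (T, a)
def partStep (right : Int) (s : List Int × Int) (b : Int) : List Int × Int :=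
  if PySem.List.pyGetD s.1 b 0 ≤ PySem.List.pyGetD s.1 right 0 then
    (pySwap s.1 b (s.2 + 1), s.2 + 1)
  else s

def pyPartition (T : List Int) (left right : Int) : List Int × Int :=
  let s := (PySem.List.pyRange left right 1).foldl (partStep right) (T, left - 1)
  let a := s.2 + 1
  (pySwap s.1 a right, a)

-- A's quickSort; fuel only makes the recursion structural (T.length + 1 always suffices)
def quickSortFuel : Nat → List Int → Int → Int → List Int
  | 0, T, _, _ => T
  | fuel + 1, T, left, right =>
    if left < right then
      let p := pyPartition T left right
      let T2 := quickSortFuel fuel p.1 left (p.2 - 1)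
      quickSortFuel fuel T2 (p.2 + 1) right
    else T

-- A's 'while a >= 0 and T[a] - time > 0' loop
def iceLoop (S : List Int) (a maxVolume time : Int) : Int :=
  if h : 0 ≤ a ∧ PySem.List.pyGetD S a 0 - time > 0 then
    iceLoop S (a - 1) (maxVolume + (PySem.List.pyGetD S a 0 - time)) (time + 1)
  else maxVolume
termination_by (a + 1).toNat
decreasing_by omega

def ice_cream (T : List Int) : Int :=
  let T1 := quickSortFuel (T.length + 1) T 0 (PySem.List.len T - 1)
  iceLoop T1 (PySem.List.len T1 - 1) 0 0

-- ===== PORT B =====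
-- B's 'sum(1 for v in T if v >= h)'
def cntGe (T : List Int) (h : Int) : Int := ((T.countP (fun v => decide (h ≤ v))) : Int)

-- B's binary-search 'while lo < hi' loop; mid = (lo + hi + 1) // 2; the fuel only makes the
-- recursion structural ((hi - lo).toNat always suffices: the interval shrinks each turn)
def bsearchAux (T : List Int) : Nat → Int → Int → Int
  | 0, lo, _ => lo
  | f + 1, lo, hi =>
    if lo < hi then
      if cntGe T (PySem.Int.floordiv (lo + hi + 1) 2) ≥ PySem.Int.floordiv (lo + hi + 1) 2 then
        bsearchAux T f (PySem.Int.floordiv (lo + hi + 1) 2) hi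
      else bsearchAux T f lo (PySem.Int.floordiv (lo + hi + 1) 2 - 1)
    else lo

def bsearchK (T : List Int) (lo hi : Int) : Int := bsearchAux T (hi - lo).toNat lo hi

def ice_cream_alt (T : List Int) : Int :=
  let n := PySem.List.len T
  let k := bsearchK T 0 n
  let ms := T.foldl (fun (p : Int × Int) v => if v > k then (p.1 + 1, p.2 + v) else p) (0, 0)
  ms.2 + (k - ms.1) * k - PySem.Int.floordiv (k * (k - 1)) 2

-- ===== PRECONDITION & SPEC =====
def Spec_ice_cream (T : List Int) (out : Int) : Prop := out = ice_cream_alt T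
instance (T : List Int) (out : Int) : Decidable (Spec_ice_cream T out) := by unfold Spec_ice_cream; infer_instance

-- ===== CLAIM (what is proved, stated in full; the proofs are below) =====
def Claim_equal_ice_cream : Prop := ∀ (T : List Int), Dom_ice_cream T → Spec_ice_cream T (ice_cream T)

-- ===== LEMMAS AND PROOFS =====

theorem getD_set (T : List Int) (i j : Nat) (v : Int) (hi : i < T.length) :
    (T.set i v).getD j 0 = if i = j then v else T.getD j 0 := by
  by_cases hj : j < T.length
  · rw [List.getD_eq_getElem _ 0 (by simpa using hj), List.getElem_set]
    split_ifs with h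
    · rfl
    · rw [List.getD_eq_getElem _ 0 hj]
  · rw [if_neg (by omega)]
    rw [List.getD_eq_default _ 0 (by simpa using (by omega : T.length ≤ j)),
        List.getD_eq_default _ 0 (by omega)]

theorem pySwap_eq (T : List Int) (i j : Int) (hi0 : 0 ≤ i) (hi : i < (T.length : Int))
    (hj0 : 0 ≤ j) (hj : j < (T.length : Int)) :
    pySwap T i j = (T.set i.toNat (T.getD j.toNat 0)).set j.toNat (T.getD i.toNat 0) := by
  unfold pySwap
  rw [PySem.List.pyGetD_eq_getElem T 0 hj0 hj, PySem.List.pyGetD_eq_getElem T 0 hi0 hi,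
      PySem.List.pySetD_of_nonneg _ _ hi0, PySem.List.pySetD_of_nonneg _ _ hj0,
      List.getD_eq_getElem T 0 (by omega), List.getD_eq_getElem T 0 (by omega)]

theorem swap_count (T : List Int) (i j : Nat) (hi : i < T.length) (hj : j < T.length) (v : Int) :
    ((T.set i (T.getD j 0)).set j (T.getD i 0)).count v = T.count v := by
  rw [List.getD_eq_getElem T 0 hj, List.getD_eq_getElem T 0 hi]
  exact (List.set_set_perm hi hj).count_eq v

theorem quickSortFuel_pos (fuel : Nat) (T : List Int) (left right : Int) (h : left < right) :
    quickSortFuel (fuel + 1) T left right =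
      quickSortFuel fuel
        (quickSortFuel fuel (pyPartition T left right).1 left ((pyPartition T left right).2 - 1))
        ((pyPartition T left right).2 + 1) right := by
  simp [quickSortFuel, h]

theorem quickSortFuel_of_not (fuel : Nat) (T : List Int) (left right : Int) (h : ¬ left < right) :
    quickSortFuel fuel T left right = T := by
  cases fuel <;> simp [quickSortFuel, h]

-- partition loop invariant, pushed from column c to the end of the range
theorem part_loop (T₀ : List Int) (left right P : Int)
    (h0 : 0 ≤ left) (hr : right < (T₀.length : Int)) (hP : P = T₀.getD right.toNat 0) :
    ∀ (m : Nat) (c : Int) (T : List Int) (a : Int),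
      (right - c).toNat = m → left ≤ c → c ≤ right →
      T.length = T₀.length →
      (∀ v, T.count v = T₀.count v) →
      left - 1 ≤ a → a < c →
      (∀ i : Nat, i < T₀.length → ((i : Int) < left ∨ c ≤ (i : Int)) → T.getD i 0 = T₀.getD i 0) →
      (∀ i : Nat, i < T₀.length → left ≤ (i : Int) → (i : Int) ≤ a → T.getD i 0 ≤ P) →
      (∀ i : Nat, i < T₀.length → a < (i : Int) → (i : Int) < c → P < T.getD i 0) →
      (((PySem.List.pyRange c right 1).foldl (partStep right) (T, a)).1.length = T₀.length) ∧
      (∀ v, ((PySem.List.pyRange c right 1).foldl (partStep right) (T, a)).1.count v = T₀.count v) ∧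
      (left - 1 ≤ ((PySem.List.pyRange c right 1).foldl (partStep right) (T, a)).2) ∧
      (((PySem.List.pyRange c right 1).foldl (partStep right) (T, a)).2 < right) ∧
      (∀ i : Nat, i < T₀.length → ((i : Int) < left ∨ right ≤ (i : Int)) →
        (((PySem.List.pyRange c right 1).foldl (partStep right) (T, a)).1).getD i 0 = T₀.getD i 0) ∧
      (∀ i : Nat, i < T₀.length → left ≤ (i : Int) →
        (i : Int) ≤ ((PySem.List.pyRange c right 1).foldl (partStep right) (T, a)).2 →
        (((PySem.List.pyRange c right 1).foldl (partStep right) (T, a)).1).getD i 0 ≤ P) ∧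
      (∀ i : Nat, i < T₀.length → ((PySem.List.pyRange c right 1).foldl (partStep right) (T, a)).2 < (i : Int) →
        (i : Int) < right → P < (((PySem.List.pyRange c right 1).foldl (partStep right) (T, a)).1).getD i 0) := by
  intro m
  induction m with
  | zero =>
    intro c T a hm hlc hcr hlen hcnt ha1 hac hout hle hgt
    have hc : c = right := by omega
    subst hc
    rw [PySem.List.pyRange_one_eq_nil (le_refl c)]
    simp only [List.foldl_nil]
    exact ⟨hlen, hcnt, ha1, by omega,
      fun i hi hcond => hout i hi hcond, hle, hgt⟩
  | succ m ih =>
    intro c T a hm hlc hcr hlen hcnt ha1 hac hout hle hgt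
    have hcright : c < right := by omega
    rw [PySem.List.pyRange_one_cons hcright]
    simp only [List.foldl_cons]
    have hTlen : (T.length : Int) = (T₀.length : Int) := by exact_mod_cast hlen
    have hrlen : right.toNat < T₀.length := by omega
    have hclen : c.toNat < T₀.length := by omega
    have hTr : PySem.List.pyGetD T right 0 = P := by
      rw [PySem.List.pyGetD_eq_getElem T 0 (by omega) (by omega),
          ← List.getD_eq_getElem T 0 (by omega : right.toNat < T.length)]
      rw [hout right.toNat hrlen (Or.inr (by omega)), hP]
    have hTc : PySem.List.pyGetD T c 0 = T.getD c.toNat 0 := by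
      rw [PySem.List.pyGetD_eq_getElem T 0 (by omega) (by omega),
          List.getD_eq_getElem T 0 (by omega)]
    by_cases hcmp : T.getD c.toNat 0 ≤ P
    · have hstep : partStep right (T, a) c = (pySwap T c (a + 1), a + 1) := by
        unfold partStep
        simp only [hTc, hTr]
        rw [if_pos hcmp]
      rw [hstep]
      have ha'0 : (0 : Int) ≤ a + 1 := by omega
      have ha'c : a + 1 ≤ c := by omega
      have ha'len : (a + 1).toNat < T₀.length := by omega
      have hswap : pySwap T c (a + 1) =
          (T.set c.toNat (T.getD (a + 1).toNat 0)).set (a + 1).toNat (T.getD c.toNat 0) :=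
        pySwap_eq T c (a + 1) (by omega) (by omega) ha'0 (by omega)
      rw [hswap]
      apply ih (c + 1) _ (a + 1) (by omega) (by omega) (by omega)
      · simp [hlen]
      · intro v
        rw [swap_count T c.toNat (a + 1).toNat (by omega) (by omega) v]
        exact hcnt v
      · omega
      · omega
      · -- outside
        intro i hi hcond
        have hlen' : c.toNat < (T.set c.toNat (T.getD (a + 1).toNat 0)).length := by simp; omega
        rw [getD_set _ _ _ _ (by simp; omega), if_neg (by omega),
            getD_set _ _ _ _ (by omega), if_neg (by omega)]
        exact hout i hi (by omega)
      · -- ≤ P up to a+1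
        intro i hi hleft hile
        by_cases hia : i = (a + 1).toNat
        · subst hia
          rw [getD_set _ _ _ _ (by simp; omega), if_pos rfl]
          exact hcmp
        · rw [getD_set _ _ _ _ (by simp; omega), if_neg (by omega),
              getD_set _ _ _ _ (by omega), if_neg (by omega)]
          exact hle i hi hleft (by omega)
      · -- > P on (a+1, c+1)
        intro i hi hgti hlti
        by_cases hic : i = c.toNat
        · subst hic
          have hac' : a + 1 < c := by omega
          rw [getD_set _ _ _ _ (by simp; omega), if_neg (by omega),
              getD_set _ _ _ _ (by omega), if_pos rfl]
          exact hgt (a + 1).toNat ha'len (by omega) (by omega)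
        · rw [getD_set _ _ _ _ (by simp; omega), if_neg (by omega),
              getD_set _ _ _ _ (by omega), if_neg (by omega)]
          exact hgt i hi (by omega) (by omega)
    · have hstep : partStep right (T, a) c = (T, a) := by
        unfold partStep
        simp only [hTc, hTr]
        rw [if_neg hcmp]
      rw [hstep]
      apply ih (c + 1) T a (by omega) (by omega) (by omega) hlen hcnt ha1 (by omega)
      · intro i hi hcond
        exact hout i hi (by omega)
      · exact hle
      · intro i hi hai hic1
        by_cases hic : (i : Int) = c
        · have : i = c.toNat := by omega
          subst this
          omega
        · exact hgt i hi hai (by omega)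

theorem partition_spec (T : List Int) (left right : Int)
    (h0 : 0 ≤ left) (hlr : left < right) (hr : right < (T.length : Int)) :
    ((pyPartition T left right).1.length = T.length) ∧
    (∀ v, (pyPartition T left right).1.count v = T.count v) ∧
    (left ≤ (pyPartition T left right).2) ∧ ((pyPartition T left right).2 ≤ right) ∧
    (∀ i : Nat, i < T.length → ((i : Int) < left ∨ right < (i : Int)) →
      (pyPartition T left right).1.getD i 0 = T.getD i 0) ∧
    (∀ i : Nat, i < T.length → left ≤ (i : Int) → (i : Int) < (pyPartition T left right).2 →
      (pyPartition T left right).1.getD i 0 ≤ (pyPartition T left right).1.getD (pyPartition T left right).2.toNat 0) ∧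
    (∀ i : Nat, i < T.length → (pyPartition T left right).2 < (i : Int) → (i : Int) ≤ right →
      (pyPartition T left right).1.getD (pyPartition T left right).2.toNat 0 < (pyPartition T left right).1.getD i 0) := by
  have hloop := part_loop T left right (T.getD right.toNat 0) h0 hr rfl
    (right - left).toNat left T (left - 1) rfl (le_refl _) (by omega) rfl (fun v => rfl)
    (by omega) (by omega) (fun i hi hcond => rfl)
    (fun i hi h1 h2 => absurd (le_trans h1 h2) (by omega))
    (fun i hi h1 h2 => absurd (lt_of_le_of_lt (by omega : left - 1 + 1 ≤ (i:Int)) h2) (by omega))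
  set F := (PySem.List.pyRange left right 1).foldl (partStep right) (T, left - 1) with hF
  obtain ⟨e1, e2, e3, e4, e5, e6, e7⟩ := hloop
  have hPart : pyPartition T left right = (pySwap F.1 (F.2 + 1) right, F.2 + 1) := rfl
  set p := F.2 + 1 with hp
  have hp0 : 0 ≤ p := by omega
  have hpr : p ≤ right := by omega
  have hplen : p.toNat < T.length := by omega
  have hrlen : right.toNat < T.length := by omega
  have hswap : pySwap F.1 p right =
      (F.1.set p.toNat (F.1.getD right.toNat 0)).set right.toNat (F.1.getD p.toNat 0) :=
    pySwap_eq F.1 p right hp0 (by rw [e1]; omega) (by omega) (by rw [e1]; omega)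
  have hP1 : (pyPartition T left right).1
      = (F.1.set p.toNat (F.1.getD right.toNat 0)).set right.toNat (F.1.getD p.toNat 0) := by
    rw [hPart]; exact hswap
  have hP2 : (pyPartition T left right).2 = p := by rw [hPart]
  rw [hP1, hP2]
  set P := T.getD right.toNat 0 with hPdef
  have hFr : F.1.getD right.toNat 0 = P := e5 right.toNat (by omega) (Or.inr (by omega))
  -- value of the result at any position
  have hval : ∀ i : Nat, i < T.length →
      ((F.1.set p.toNat (F.1.getD right.toNat 0)).set right.toNat (F.1.getD p.toNat 0)).getD i 0
        = if right.toNat = i then F.1.getD p.toNat 0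
          else if p.toNat = i then P else F.1.getD i 0 := by
    intro i hi
    rw [getD_set _ _ _ _ (by simp; omega)]
    split_ifs with h1 h2
    · rfl
    · rw [getD_set _ _ _ _ (by omega), if_pos h2]
      exact hFr
    · rw [getD_set _ _ _ _ (by omega), if_neg h2]
  have hvp : ((F.1.set p.toNat (F.1.getD right.toNat 0)).set right.toNat (F.1.getD p.toNat 0)).getD p.toNat 0 = P := by
    rw [hval p.toNat (by omega)]
    by_cases h1 : right.toNat = p.toNat
    · rw [if_pos h1]
      rw [h1] at hFr
      exact hFr
    · rw [if_neg h1, if_pos rfl]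
  refine ⟨by simp [e1], ?_, by omega, by omega, ?_, ?_, ?_⟩
  · intro v
    rw [swap_count F.1 p.toNat right.toNat (by omega) (by omega) v]
    exact e2 v
  · -- outside
    intro i hi hcond
    rw [hval i hi, if_neg (by omega), if_neg (by omega)]
    exact e5 i hi (by omega)
  · -- left part ≤ pivot
    intro i hi hleft hlt
    simp only [hvp]
    rw [hval i hi, if_neg (by omega), if_neg (by omega)]
    exact e6 i hi hleft (by omega)
  · -- right part > pivot
    intro i hi hgt' hle'
    simp only [hvp]
    rw [hval i hi]
    by_cases h1 : right.toNat = i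
    · rw [if_pos h1]
      have hpltr : p < right := by omega
      exact e7 p.toNat (by omega) (by omega) (by omega)
    · rw [if_neg h1, if_neg (by omega)]
      exact e7 i hi (by omega) (by omega)

-- a property of the values on positions [l, r) transfers between count-equal lists agreeing outside
theorem seg_transfer (X Y : List Int) (l r : Nat) (hlen : X.length = Y.length)
    (hlr : l ≤ r) (hr : r ≤ Y.length)
    (hcount : ∀ v, X.count v = Y.count v)
    (hout : ∀ i : Nat, i < Y.length → (i < l ∨ r ≤ i) → X.getD i 0 = Y.getD i 0)
    (Q : Int → Prop) (hQ : ∀ i : Nat, l ≤ i → i < r → i < Y.length → Q (Y.getD i 0)) :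
    ∀ i : Nat, l ≤ i → i < r → i < Y.length → Q (X.getD i 0) := by
  have hgd : ∀ (Z : List Int) (i : Nat) (h : i < Z.length), Z.getD i 0 = Z[i] := by
    intro Z i h; exact List.getD_eq_getElem Z 0 h
  have htake : X.take l = Y.take l := by
    apply List.ext_getElem (by simp [hlen])
    intro i h1 h2
    have hiY : i < Y.length := by simp at h2; omega
    rw [List.getElem_take, List.getElem_take]
    have := hout i hiY (Or.inl (by simp at h1; omega))
    rw [hgd X i (by omega), hgd Y i hiY] at this; exact this
  have hdrop : X.drop r = Y.drop r := by
    apply List.ext_getElem (by simp [hlen])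
    intro i h1 h2
    rw [List.getElem_drop, List.getElem_drop]
    have hiY : r + i < Y.length := by simp at h2; omega
    have := hout (r + i) hiY (Or.inr (by omega))
    rw [hgd X (r+i) (by omega), hgd Y (r+i) hiY] at this; exact this
  have dx : X = X.take l ++ ((X.drop l).take (r - l) ++ X.drop r) := by
    conv_lhs => rw [← List.take_append_drop l X]
    congr 1
    conv_lhs => rw [← List.take_append_drop (r - l) (X.drop l)]
    congr 1
    rw [List.drop_drop]; congr 1; omega
  have dy : Y = Y.take l ++ ((Y.drop l).take (r - l) ++ Y.drop r) := by
    conv_lhs => rw [← List.take_append_drop l Y]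
    congr 1
    conv_lhs => rw [← List.take_append_drop (r - l) (Y.drop l)]
    congr 1
    rw [List.drop_drop]; congr 1; omega
  have hseg : ∀ v, ((X.drop l).take (r - l)).count v = ((Y.drop l).take (r - l)).count v := by
    intro v
    have cx := hcount v
    rw [dx, dy] at cx
    simp only [List.count_append, htake, hdrop] at cx
    omega
  intro i hl hir hiY
  have hiX : i < X.length := by omega
  have hmem : X.getD i 0 ∈ (X.drop l).take (r - l) := by
    rw [hgd X i hiX]
    have : i - l < ((X.drop l).take (r - l)).length := by simp; omega
    refine List.mem_iff_getElem.mpr ⟨i - l, this, ?_⟩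
    rw [List.getElem_take, List.getElem_drop]
    congr 1; omega
  have hmem' : X.getD i 0 ∈ (Y.drop l).take (r - l) := by
    have := List.count_pos_iff.mpr hmem
    rw [hseg] at this
    exact List.count_pos_iff.mp this
  obtain ⟨j, hj, hjv⟩ := List.mem_iff_getElem.mp hmem'
  have hjl : j < r - l := by simp at hj; omega
  have hjY : l + j < Y.length := by simp at hj; omega
  rw [List.getElem_take, List.getElem_drop] at hjv
  have := hQ (l + j) (by omega) (by omega) hjY
  rw [hgd Y (l+j) hjY] at this
  rwa [hjv] at this


theorem qs_spec : ∀ (fuel : Nat) (T : List Int) (left right : Int),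
    0 ≤ left → right < (T.length : Int) → right - left + 1 ≤ (fuel : Int) →
    ((quickSortFuel fuel T left right).length = T.length) ∧
    (∀ v, (quickSortFuel fuel T left right).count v = T.count v) ∧
    (∀ i : Nat, i < T.length → ((i : Int) < left ∨ right < (i : Int)) →
      (quickSortFuel fuel T left right).getD i 0 = T.getD i 0) ∧
    (∀ i j : Nat, left ≤ (i : Int) → i ≤ j → (j : Int) ≤ right → j < T.length →
      (quickSortFuel fuel T left right).getD i 0 ≤ (quickSortFuel fuel T left right).getD j 0) := by
  intro fuel
  induction fuel with
  | zero =>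
    intro T left right h0 hrlen hfuel
    have htr : quickSortFuel 0 T left right = T := rfl
    rw [htr]
    exact ⟨rfl, fun v => rfl, fun i hi hc => rfl,
      fun i j hli hij hjr hjlen => by omega⟩
  | succ fuel ih =>
    intro T left right h0 hrlen hfuel
    by_cases hlr : left < right
    · rw [quickSortFuel_pos fuel T left right hlr]
      obtain ⟨p1, p2, p3, p4, p5, p6, p7⟩ := partition_spec T left right h0 hlr hrlen
      set T1 := (pyPartition T left right).1 with hT1
      set p := (pyPartition T left right).2 with hpdef
      have hplen : p.toNat < T.length := by omega
      obtain ⟨q1, q2, q3, q4⟩ := ih T1 left (p - 1) h0 (by rw [p1]; omega) (by omega)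
      set T2 := quickSortFuel fuel T1 left (p - 1) with hT2
      obtain ⟨r1, r2, r3, r4⟩ := ih T2 (p + 1) right (by omega)
        (by rw [q1, p1]; omega) (by omega)
      set R := quickSortFuel fuel T2 (p + 1) right with hRdef
      have hlen2 : T2.length = T.length := by rw [q1, p1]
      have hlenR : R.length = T.length := by rw [r1, hlen2]
      -- pointwise facts
      have hT2T1out : ∀ i : Nat, i < T.length → ((i : Int) < left ∨ p - 1 < (i : Int)) →
          T2.getD i 0 = T1.getD i 0 := by
        intro i hi hc
        exact q3 i (by omega) hc
      have hRT2out : ∀ i : Nat, i < T.length → ((i : Int) < p + 1 ∨ right < (i : Int)) →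
          R.getD i 0 = T2.getD i 0 := by
        intro i hi hc
        exact r3 i (by omega) hc
      have hRp : R.getD p.toNat 0 = T1.getD p.toNat 0 := by
        rw [hRT2out p.toNat (by omega) (Or.inl (by omega)),
            hT2T1out p.toNat (by omega) (Or.inr (by omega))]
      -- values left of the pivot stay ≤ pivot
      have bound1 : ∀ i : Nat, i < T.length → left ≤ (i : Int) → (i : Int) < p →
          T2.getD i 0 ≤ T1.getD p.toNat 0 := by
        intro i hi hli hip
        refine seg_transfer T2 T1 left.toNat p.toNat (by rw [q1, p1]) (by omega) (by omega)
          q2 ?_ (· ≤ T1.getD p.toNat 0) ?_ i (by omega) (by omega) (by omega)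
        · intro i' hi' hc
          exact hT2T1out i' (by omega) (by omega)
        · intro i' h1 h2 h3
          exact p6 i' (by omega) (by omega) (by omega)
      -- values right of the pivot stay > pivot
      have bound2 : ∀ i : Nat, i < T.length → p < (i : Int) → (i : Int) ≤ right →
          T1.getD p.toNat 0 < R.getD i 0 := by
        intro i hi hpi hir
        refine seg_transfer R T2 (p.toNat + 1) (right.toNat + 1) (by rw [r1]) (by omega)
          (by omega) r2 ?_ (T1.getD p.toNat 0 < ·) ?_ i (by omega) (by omega) (by omega)
        · intro i' hi' hc
          exact hRT2out i' (by omega) (by omega)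
        · intro i' h1 h2 h3
          rw [hT2T1out i' (by omega) (Or.inr (by omega))]
          exact p7 i' (by omega) (by omega) (by omega)
      refine ⟨hlenR, ?_, ?_, ?_⟩
      · intro v
        rw [r2 v, q2 v, p2 v]
      · intro i hi hc
        rw [hRT2out i hi (by omega), hT2T1out i hi (by omega)]
        exact p5 i hi (by omega)
      · intro i j hli hij hjr hjlen
        by_cases hjp : (j : Int) < p
        · rw [hRT2out i (by omega) (Or.inl (by omega)), hRT2out j (by omega) (Or.inl (by omega))]
          exact q4 i j hli hij (by omega) (by omega)
        · by_cases hip : p < (i : Int)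
          · exact r4 i j (by omega) hij hjr (by omega)
          · -- left ≤ i ≤ p ≤ j
            by_cases hiep : (i : Int) = p
            · have hieq : i = p.toNat := by omega
              subst hieq
              by_cases hjep : (j : Int) = p
              · have : j = p.toNat := by omega
                rw [this]
              · rw [hRp]
                exact le_of_lt (bound2 j (by omega) (by omega) (by omega))
            · have hiltp : (i : Int) < p := by omega
              by_cases hjep : (j : Int) = p
              · have hjeq : j = p.toNat := by omega
                subst hjeq
                rw [hRp, hRT2out i (by omega) (Or.inl (by omega))]
                exact bound1 i (by omega) (by omega) (by omega)
              · rw [hRT2out i (by omega) (Or.inl (by omega))]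
                exact le_of_lt (lt_of_le_of_lt (bound1 i (by omega) (by omega) (by omega))
                  (bound2 j (by omega) (by omega) (by omega)))
    · rw [quickSortFuel_of_not _ T left right hlr]
      exact ⟨rfl, fun v => rfl, fun i hi hc => rfl,
        fun i j hli hij hjr hjlen => by
          have : i = j := by omega
          rw [this]⟩

-- proof-level helper: the number of iterations of A's scan loop
def countLoop (S : List Int) (n k : Int) : Int :=
  if h : k < n ∧ PySem.List.pyGetD S (n - 1 - k) 0 - k > 0 then countLoop S n (k + 1) else k
termination_by (n - k).toNat
decreasing_by omega

theorem countLoop_ge (S : List Int) (n : Int) : ∀ (k : Int), k ≤ countLoop S n k := by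
  intro k
  fun_induction countLoop S n k with
  | case1 k h ih => omega
  | case2 k h => omega

theorem countLoop_le (S : List Int) (n : Int) : ∀ (k : Int), k ≤ n → countLoop S n k ≤ n := by
  intro k
  fun_induction countLoop S n k with
  | case1 k h ih => intro _; exact ih (by omega)
  | case2 k h => intro hk; exact hk

theorem countLoop_facts (S : List Int) (n : Int) : ∀ (k : Int),
    (∀ j, k ≤ j → j < countLoop S n k → PySem.List.pyGetD S (n - 1 - j) 0 - j > 0) ∧
    (countLoop S n k < n → PySem.List.pyGetD S (n - 1 - countLoop S n k) 0 - countLoop S n k ≤ 0) := by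
  intro k
  fun_induction countLoop S n k with
  | case1 k h ih =>
    refine ⟨?_, ih.2⟩
    intro j hkj hjlt
    by_cases hjk : j = k
    · subst hjk; exact h.2
    · exact ih.1 j (by omega) hjlt
  | case2 k h =>
    refine ⟨fun j h1 h2 => by omega, fun hkn => ?_⟩
    by_contra hc
    exact h ⟨hkn, by omega⟩

-- the scan loop of A on any list equals the slice-sum / triangular-number closed form
theorem scan_eq (S : List Int) : ∀ (m : Nat) (k acc : Int),
    ((S.length : Int) - k).toNat = m → 0 ≤ k → k ≤ (S.length : Int) →
    iceLoop S ((S.length : Int) - 1 - k) acc k =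
      acc + ((S.drop ((S.length : Int) - countLoop S (S.length : Int) k).toNat).take
               ((countLoop S (S.length : Int) k - k)).toNat).sum
          - ((countLoop S (S.length : Int) k * (countLoop S (S.length : Int) k - 1)) / 2 - (k * (k - 1)) / 2) := by
  intro m
  induction m with
  | zero =>
    intro k acc hm h0 hk
    have hkn : k = (S.length : Int) := by omega
    rw [iceLoop, dif_neg (by omega), countLoop, dif_neg (by omega)]
    have h1 : (k - k).toNat = 0 := by omega
    rw [h1]
    simp
  | succ m ih =>
    intro k acc hm h0 hk
    by_cases hg : k < (S.length : Int) ∧ PySem.List.pyGetD S ((S.length : Int) - 1 - k) 0 - k > 0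
    · have hK : countLoop S (S.length : Int) k = countLoop S (S.length : Int) (k + 1) := by
        rw [countLoop, dif_pos hg]
      rw [iceLoop, dif_pos ⟨by omega, hg.2⟩, hK]
      have harg : (S.length : Int) - 1 - k - 1 = (S.length : Int) - 1 - (k + 1) := by ring
      rw [harg, ih (k + 1) _ (by omega) (by omega) (by omega)]
      have hk1K : k + 1 ≤ countLoop S (S.length : Int) (k + 1) := countLoop_ge S _ (k + 1)
      have hKn : countLoop S (S.length : Int) (k + 1) ≤ (S.length : Int) :=
        countLoop_le S _ (k + 1) (by omega)
      have hlen : ((S.length : Int) - 1 - k).toNat < S.length := by omega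
      have hsum : ((S.drop ((S.length : Int) - countLoop S (S.length : Int) (k + 1)).toNat).take
              (countLoop S (S.length : Int) (k + 1) - k).toNat).sum
          = ((S.drop ((S.length : Int) - countLoop S (S.length : Int) (k + 1)).toNat).take
              (countLoop S (S.length : Int) (k + 1) - (k + 1)).toNat).sum
            + S.getD ((S.length : Int) - 1 - k).toNat 0 := by
        have h1 : (countLoop S (S.length : Int) (k + 1) - k).toNat
            = (countLoop S (S.length : Int) (k + 1) - (k + 1)).toNat + 1 := by omega
        rw [h1, List.take_add_one, List.sum_append]
        congr 1
        rw [List.getElem?_drop]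
        have h2 : ((S.length : Int) - countLoop S (S.length : Int) (k + 1)).toNat
            + (countLoop S (S.length : Int) (k + 1) - (k + 1)).toNat
            = ((S.length : Int) - 1 - k).toNat := by omega
        rw [h2, List.getElem?_eq_getElem hlen, List.getD_eq_getElem S 0 hlen]
        simp
      have hgv : PySem.List.pyGetD S ((S.length : Int) - 1 - k) 0
          = S.getD ((S.length : Int) - 1 - k).toNat 0 := by
        rw [PySem.List.pyGetD_eq_getElem S 0 (by omega) (by omega),
            List.getD_eq_getElem S 0 hlen]
      have htri : ((k + 1) * (k + 1 - 1)) / 2 = (k * (k - 1)) / 2 + k := by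
        have h3 : (k + 1) * (k + 1 - 1) = k * (k - 1) + k * 2 := by ring
        rw [h3, Int.add_mul_ediv_right _ _ (by norm_num)]
      rw [hsum, hgv, htri]
      ring
    · rw [iceLoop, dif_neg (fun hc => hg ⟨by omega, hc.2⟩), countLoop, dif_neg hg]
      have h1 : (k - k).toNat = 0 := by omega
      rw [h1]
      simp

-- B's counting/summing pass computes filter length and filter sum
theorem fold_ms (k : Int) : ∀ (T : List Int) (m s : Int),
    T.foldl (fun (p : Int × Int) v => if v > k then (p.1 + 1, p.2 + v) else p) (m, s)
      = (m + ((T.filter (fun v => decide (k < v))).length : Int),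
         s + (T.filter (fun v => decide (k < v))).sum) := by
  intro T
  induction T with
  | nil => intro m s; simp
  | cons x xs ih =>
    intro m s
    by_cases hx : k < x
    · rw [List.foldl_cons, if_pos (by omega : x > k), ih,
          List.filter_cons_of_pos (by simpa using hx)]
      simp only [List.length_cons, List.sum_cons]
      push_cast
      simp only [Prod.mk.injEq]
      constructor <;> ring
    · rw [List.foldl_cons, if_neg (by omega : ¬ x > k), ih,
          List.filter_cons_of_neg (by simpa using hx)]

theorem cntGe_anti (T : List Int) (h1 h2 : Int) (h : h1 ≤ h2) : cntGe T h2 ≤ cntGe T h1 := by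
  unfold cntGe
  have := List.countP_mono_left (l := T)
    (p := fun v => decide (h2 ≤ v)) (q := fun v => decide (h1 ≤ v))
    (fun x _ hx => by simp at hx ⊢; omega)
  exact_mod_cast this

-- the binary search returns the largest h in [lo, hi] with cntGe T h ≥ h
theorem bsearchAux_spec (T : List Int) : ∀ (f : Nat) (lo hi : Int),
    (hi - lo).toNat ≤ f → lo ≤ hi → cntGe T lo ≥ lo →
    lo ≤ bsearchAux T f lo hi ∧ bsearchAux T f lo hi ≤ hi ∧
    cntGe T (bsearchAux T f lo hi) ≥ bsearchAux T f lo hi ∧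
    (∀ h, bsearchAux T f lo hi < h → h ≤ hi → cntGe T h < h) := by
  intro f
  induction f with
  | zero =>
    intro lo hi hf hle hlo
    have hlohi : lo = hi := by omega
    rw [show bsearchAux T 0 lo hi = lo from rfl]
    exact ⟨le_refl _, hle, hlo, fun h h1 h2 => by omega⟩
  | succ f ih =>
    intro lo hi hf hle hlo
    by_cases hlt : lo < hi
    · have hd := PySem.Int.floordiv_eq_ediv_of_pos (b := 2) (a := lo + hi + 1) (by norm_num)
      have hmid1 : lo < PySem.Int.floordiv (lo + hi + 1) 2 := by rw [hd]; omega
      have hmid2 : PySem.Int.floordiv (lo + hi + 1) 2 ≤ hi := by rw [hd]; omega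
      by_cases hcond : cntGe T (PySem.Int.floordiv (lo + hi + 1) 2) ≥ PySem.Int.floordiv (lo + hi + 1) 2
      · rw [bsearchAux, if_pos hlt, if_pos hcond]
        obtain ⟨a1, a2, a3, a4⟩ := ih (PySem.Int.floordiv (lo + hi + 1) 2) hi (by omega) hmid2 hcond
        exact ⟨by omega, a2, a3, a4⟩
      · rw [bsearchAux, if_pos hlt, if_neg hcond]
        obtain ⟨a1, a2, a3, a4⟩ := ih lo (PySem.Int.floordiv (lo + hi + 1) 2 - 1) (by omega) (by omega) hlo
        refine ⟨a1, by omega, a3, ?_⟩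
        intro h hgt hhle
        by_cases hcase : h ≤ PySem.Int.floordiv (lo + hi + 1) 2 - 1
        · exact a4 h hgt hcase
        · have hge : PySem.Int.floordiv (lo + hi + 1) 2 ≤ h := by omega
          have := cntGe_anti T (PySem.Int.floordiv (lo + hi + 1) 2) h hge
          omega
    · rw [bsearchAux, if_neg hlt]
      exact ⟨le_refl _, hle, hlo, fun h h1 h2 => by omega⟩

theorem bsearch_spec (T : List Int) (lo hi : Int) (hle : lo ≤ hi) (hlo : cntGe T lo ≥ lo) :
    lo ≤ bsearchK T lo hi ∧ bsearchK T lo hi ≤ hi ∧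
    cntGe T (bsearchK T lo hi) ≥ bsearchK T lo hi ∧
    (∀ h, bsearchK T lo hi < h → h ≤ hi → cntGe T h < h) :=
  bsearchAux_spec T (hi - lo).toNat lo hi (le_refl _) hle hlo

-- splitting a sum along a Boolean predicate
theorem sum_split (p : Int → Bool) : ∀ (l : List Int),
    (l.filter p).sum + (l.filter (fun v => ! p v)).sum = l.sum := by
  intro l
  induction l with
  | nil => simp
  | cons x xs ih =>
    by_cases hx : p x <;>
      simp only [List.filter_cons, hx, Bool.not_true, Bool.not_false, if_pos,
        Bool.false_eq_true, ite_false, List.sum_cons] <;> omega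

-- sum of a list of copies of k
theorem sum_const_eq (k : Int) : ∀ (l : List Int), (∀ x ∈ l, x = k) → l.sum = (l.length : Int) * k := by
  intro l
  induction l with
  | nil => intro _; simp
  | cons x xs ih =>
    intro h
    have hx : x = k := h x (List.mem_cons_self)
    rw [List.sum_cons, ih (fun y hy => h y (List.mem_cons_of_mem _ hy)), hx]
    simp only [List.length_cons]
    push_cast
    ring

-- ===== VERDICT (by name: the statement is the Claim_ definition above) =====
theorem ice_cream_spec : Claim_equal_ice_cream := by
  intro T _
  unfold Spec_ice_cream
  simp only [ice_cream, ice_cream_alt, PySem.List.len_eq]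
  obtain ⟨hlen, hcnt, hout, hsort⟩ :=
    qs_spec (T.length + 1) T 0 ((T.length : Int) - 1) (by omega) (by omega) (by omega)
  set R := quickSortFuel (T.length + 1) T 0 ((T.length : Int) - 1) with hR
  have hperm : R.Perm T := List.perm_iff_count.mpr hcnt
  set n : Int := (T.length : Int) with hn
  rw [show ((R.length : Int)) = n by rw [hlen]]
  simp only [← hn]
  -- A's side: value via countLoop
  have hK0 : 0 ≤ countLoop R n 0 := countLoop_ge R n 0
  have hKn : countLoop R n 0 ≤ n := countLoop_le R n 0 (by omega)
  set K := countLoop R n 0 with hKdef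
  have hscan := scan_eq R ((R.length : Int) - 0).toNat 0 0 rfl (le_refl 0) (by omega)
  rw [hlen, ← hn] at hscan
  have harg : n - 1 - 0 = n - 1 := by ring
  rw [harg] at hscan
  rw [hscan, ← hKdef]
  have hsub0 : (K - 0).toNat = K.toNat := by omega
  rw [hsub0]
  -- shared index facts about the sorted list R
  obtain ⟨hKfacts1, hKfacts2⟩ := countLoop_facts R n 0
  have hRlen : R.length = T.length := hlen
  have hgd : ∀ (i : Nat) (h : i < R.length), R.getD i 0 = R[i] := fun i h => List.getD_eq_getElem R 0 h
  have hsorted : ∀ i j : Nat, i ≤ j → j < R.length → R.getD i 0 ≤ R.getD j 0 := by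
    intro i j hij hj
    exact hsort i j (by omega) hij (by omega) (by omega)
  -- every element of the taken suffix is ≥ K; every earlier element is ≤ K
  have hsufGe : ∀ i : Nat, (n - K).toNat ≤ i → i < R.length → K ≤ R.getD i 0 := by
    intro i hge hi
    rcases (by omega : K = 0 ∨ 0 < K) with h0 | hpos
    · rw [h0]
      -- with K = 0: R[i] ≥ 0? not needed; but (n-0).toNat ≤ i < n impossible
      omega
    · have hstep := hKfacts1 (K - 1) (by omega) (by omega)
      have hidx : PySem.List.pyGetD R (n - 1 - (K - 1)) 0 = R.getD (n - K).toNat 0 := by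
        rw [PySem.List.pyGetD_eq_getElem R 0 (by omega) (by omega), hgd (n - K).toNat (by omega)]
        congr 1
        omega
      rw [hidx] at hstep
      have := hsorted (n - K).toNat i hge hi
      omega
  have hpreLe : ∀ i : Nat, i < (n - K).toNat → R.getD i 0 ≤ K := by
    intro i hlt
    have hKltn : K < n := by omega
    have hstop := hKfacts2 hKltn
    have hidx : PySem.List.pyGetD R (n - 1 - K) 0 = R.getD (n - 1 - K).toNat 0 := by
      rw [PySem.List.pyGetD_eq_getElem R 0 (by omega) (by omega),
          ← hgd (n - 1 - K).toNat (by omega)]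
    rw [hidx] at hstop
    have := hsorted i (n - 1 - K).toNat (by omega) (by omega)
    omega
  -- decompose R
  have hRdec : R = R.take (n - K).toNat ++ R.drop (n - K).toNat := (List.take_append_drop _ R).symm
  have hdropLen : (R.drop (n - K).toNat).length = K.toNat := by simp [hRlen]; omega
  have hmemTake : ∀ x ∈ R.take (n - K).toNat, x ≤ K := by
    intro x hx
    obtain ⟨i, hi, hxi⟩ := List.mem_iff_getElem.mp hx
    rw [List.getElem_take] at hxi
    have hiR : i < R.length := by simp at hi; omega
    have := hpreLe i (by simp at hi; omega)
    rw [hgd i hiR] at this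
    omega
  have hmemDrop : ∀ x ∈ R.drop (n - K).toNat, K ≤ x := by
    intro x hx
    obtain ⟨i, hi, hxi⟩ := List.mem_iff_getElem.mp hx
    rw [List.getElem_drop] at hxi
    have hiR : (n - K).toNat + i < R.length := by simp at hi; omega
    have := hsufGe ((n - K).toNat + i) (by omega) hiR
    rw [hgd _ hiR] at this
    omega
  -- B's k equals K
  have hB := bsearch_spec T 0 n (by omega) (by unfold cntGe; positivity)
  obtain ⟨b1, b2, b3, b4⟩ := hB
  set k := bsearchK T 0 n with hkdef
  have hcntRT : ∀ h : Int, cntGe T h = cntGe R h := by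
    intro h
    unfold cntGe
    rw [hperm.countP_eq]
  have hcondK : cntGe T K ≥ K := by
    rw [hcntRT]
    unfold cntGe
    conv_lhs => rw [hRdec]
    rw [List.countP_append]
    have hall : (R.drop (n - K).toNat).countP (fun v => decide (K ≤ v)) = (R.drop (n - K).toNat).length :=
      List.countP_eq_length.mpr (fun a ha => by simpa using hmemDrop a ha)
    rw [hall, hdropLen]
    have : (0:Nat) ≤ (R.take (n - K).toNat).countP (fun v => decide (K ≤ v)) := Nat.zero_le _
    push_cast
    omega
  have hfailK : ∀ h, K < h → h ≤ n → cntGe T h < h := by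
    intro h hgt hle
    rw [hcntRT]
    unfold cntGe
    conv_lhs => rw [hRdec]
    rw [List.countP_append]
    have hz : (R.take (n - K).toNat).countP (fun v => decide (h ≤ v)) = 0 :=
      List.countP_eq_zero.mpr (fun a ha => by
        have := hmemTake a ha
        simp
        omega)
    have hub : (R.drop (n - K).toNat).countP (fun v => decide (h ≤ v)) ≤ K.toNat := by
      rw [← hdropLen]
      exact List.countP_le_length
    rw [hz]
    push_cast
    omega
  have hkK : k = K := by
    by_contra hne
    rcases (by omega : k < K ∨ K < k) with hlt | hlt
    · have := b4 K hlt (by omega)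
      omega
    · have := hfailK k hlt (by omega)
      omega
  simp only [hkK]
  -- B's value: counting pass over T
  rw [fold_ms]
  set F : Int → Bool := fun v => decide (K < v) with hF
  have hfperm : (R.filter F).Perm (T.filter F) := hperm.filter F
  have hflen : ((T.filter F).length : Int) = ((R.filter F).length : Int) := by
    rw [hfperm.length_eq]
  have hfsum : (T.filter F).sum = (R.filter F).sum := hfperm.sum_eq.symm
  -- the filter of R lives entirely in the dropped suffix
  have hfR : R.filter F = (R.drop (n - K).toNat).filter F := by
    conv_lhs => rw [hRdec]
    rw [List.filter_append]
    have hz : (R.take (n - K).toNat).filter F = [] :=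
      List.filter_eq_nil_iff.mpr (fun a ha => by
        have := hmemTake a ha
        simp [hF]
        omega)
    rw [hz, List.nil_append]
  -- split the suffix sum
  set S := R.drop (n - K).toNat with hSdef
  have hsplit : (S.filter F).sum + (S.filter (fun v => ! F v)).sum = S.sum := sum_split F S
  have hsplitLen : S.length = (S.filter F).length + (S.filter (fun v => ! F v)).length := by
    simpa using List.length_eq_length_filter_add (l := S) F
  have hconst : ∀ x ∈ S.filter (fun v => ! F v), x = K := by
    intro x hx
    rw [List.mem_filter] at hx
    have h1 := hmemDrop x hx.1
    have h2 := hx.2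
    simp [hF] at h2
    omega
  have hconstSum : (S.filter (fun v => ! F v)).sum = ((S.filter (fun v => ! F v)).length : Int) * K :=
    sum_const_eq K _ hconst
  have hStake : S.take K.toNat = S := List.take_of_length_le (by rw [hdropLen])
  rw [hStake]
  -- finish with arithmetic
  dsimp only
  rw [PySem.Int.floordiv_eq_ediv_of_pos (by norm_num : (0:Int) < 2)]
  have hm : ((T.filter F).length : Int) = ((S.filter F).length : Int) := by
    rw [hflen, hfR]
  have hs : (T.filter F).sum = (S.filter F).sum := by rw [hfsum, hfR]
  have hSlen : (S.length : Int) = K := by rw [hdropLen]; omega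
  have htri0 : ((0 : Int) * (0 - 1)) / 2 = 0 := by norm_num
  rw [htri0, hm, hs]
  rw [show S.sum = (S.filter F).sum + ((S.filter (fun v => ! F v)).length : Int) * K from by
    rw [← hsplit, hconstSum]]
  rw [show ((S.filter (fun v => ! F v)).length : Int) = K - ((S.filter F).length : Int) from by
    omega]
  ring
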